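-- pv_equiv track=rewrite | github.com/0xmariowu/Autosearch | autosearch/core/doctor.py | _compute_tier
-- ===== SOURCE A (Python) =====
-- _TIER2_ENV_PATTERNS = ("COOKIES", "COOKIE", "SESSION", "SESSDATA", "AUTH_TOKEN")
--
-- _TIER1_ENV_PATTERNS = ("API_KEY", "TIKHUB", "YOUTUBE", "FIRECRAWL", "OPENROUTER")
--
-- def _compute_tier(all_requires: list[str]) -> int:
--     """Infer tier from a channel's full requires list.
--
--     Tier 2 > Tier 1 > Tier 0: if any require implies login, tier=2.
--     """
--     for token in all_requires:
--         kind, _, value = token.partition(":")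
--         if kind == "env":
--             if any(p in value.upper() for p in _TIER2_ENV_PATTERNS):
--                 return 2
--         elif kind in ("cookie",):
--             return 2
--     for token in all_requires:
--         kind, _, value = token.partition(":")
--         if kind == "env":
--             if any(p in value.upper() for p in _TIER1_ENV_PATTERNS):
--                 return 1
--         elif kind in ("binary", "mcp"):
--             return 1
--     return 0
-- ===== SOURCE B (Python) =====
-- _TIER2_ENV_PATTERNS = ("COOKIES", "COOKIE", "SESSION", "SESSDATA", "AUTH_TOKEN")
--
-- _TIER1_ENV_PATTERNS = ("API_KEY", "TIKHUB", "YOUTUBE", "FIRECRAWL", "OPENROUTER")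
--
--
-- def _compute_tier(all_requires: list[str]) -> int:
--     """Single pass: short-circuit to 2 on any tier-2 token, remember tier-1 hits."""
--     saw_tier1 = False
--     for token in all_requires:
--         kind, _, value = token.partition(":")
--         if kind == "cookie" or (kind == "env" and any(p in value.upper() for p in _TIER2_ENV_PATTERNS)):
--             return 2
--         if kind in ("binary", "mcp") or (kind == "env" and any(p in value.upper() for p in _TIER1_ENV_PATTERNS)):
--             saw_tier1 = True
--     return 1 if saw_tier1 else 0
-- ===== Notes on version B (the rewrite author's own statement) =====
-- stated objective: simpler
-- what changed: Replaces A's two sequential scans with one pass that returns 2 immediately on a tier-2 token and otherwise remembers in a boolean whether any tier-1 token was seen.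
import Mathlib
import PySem

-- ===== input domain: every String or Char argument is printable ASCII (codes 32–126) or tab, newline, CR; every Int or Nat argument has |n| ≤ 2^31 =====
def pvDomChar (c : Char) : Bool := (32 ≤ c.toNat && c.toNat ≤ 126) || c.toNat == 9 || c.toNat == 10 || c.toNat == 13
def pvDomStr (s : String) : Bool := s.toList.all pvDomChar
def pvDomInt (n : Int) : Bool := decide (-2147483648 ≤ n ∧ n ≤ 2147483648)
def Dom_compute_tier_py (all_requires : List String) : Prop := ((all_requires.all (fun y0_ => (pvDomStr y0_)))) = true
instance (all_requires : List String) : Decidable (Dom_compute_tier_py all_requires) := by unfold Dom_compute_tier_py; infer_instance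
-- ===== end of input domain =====

-- B merges A's two scans into one pass with an early return on tier 2 and a boolean for tier 1 (objective: simpler).

-- shared helpers (the module constants and token.partition(":"), ported by hand, exact for a 1-char separator:
-- partition splits at the FIRST ':'; if none, kind = token and value = "")
def pvTier2Pats : List (List Char) :=
  ["COOKIES".toList, "COOKIE".toList, "SESSION".toList, "SESSDATA".toList, "AUTH_TOKEN".toList]

def pvTier1Pats : List (List Char) :=
  ["API_KEY".toList, "TIKHUB".toList, "YOUTUBE".toList, "FIRECRAWL".toList, "OPENROUTER".toList]

def pvPartition : List Char → List Char × List Char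
  | [] => ([], [])
  | c :: rest =>
      if c = ':' then ([], rest)
      else
        let p := pvPartition rest
        (c :: p.1, p.2)

-- any(p in value.upper() for p in pats)
def pvAnyIn (pats : List (List Char)) (value : List Char) : Bool :=
  pats.any (fun p => PySem.Chars.isIn p (PySem.Chars.upper value))

-- ===== PORT A =====
-- A's first loop: returns some 2 on a tier-2 token, none otherwise
def pvLoop1 : List String → Option Int
  | [] => none
  | token :: rest =>
      let kv := pvPartition token.toList
      if kv.1 = "env".toList then
        if pvAnyIn pvTier2Pats kv.2 then some 2 else pvLoop1 rest
      else if kv.1 = "cookie".toList then some 2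
      else pvLoop1 rest

-- A's second loop: returns some 1 on a tier-1 token, none otherwise
def pvLoop2 : List String → Option Int
  | [] => none
  | token :: rest =>
      let kv := pvPartition token.toList
      if kv.1 = "env".toList then
        if pvAnyIn pvTier1Pats kv.2 then some 1 else pvLoop2 rest
      else if kv.1 = "binary".toList ∨ kv.1 = "mcp".toList then some 1
      else pvLoop2 rest

def compute_tier_py (all_requires : List String) : Int :=
  match pvLoop1 all_requires with
  | some r => r
  | none =>
      match pvLoop2 all_requires with
      | some r => r
      | none => 0

-- ===== PORT B =====
-- one pass with a saw_tier1 accumulator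
def pvLoopB : List String → Bool → Int
  | [], saw => if saw then 1 else 0
  | token :: rest, saw =>
      let kv := pvPartition token.toList
      if kv.1 = "cookie".toList ∨ (kv.1 = "env".toList ∧ pvAnyIn pvTier2Pats kv.2) then 2
      else
        pvLoopB rest
          (saw || decide (kv.1 = "binary".toList ∨ kv.1 = "mcp".toList ∨
                          (kv.1 = "env".toList ∧ pvAnyIn pvTier1Pats kv.2)))

def compute_tier_py_alt (all_requires : List String) : Int :=
  pvLoopB all_requires false

-- ===== PRECONDITION & SPEC =====
def Spec_compute_tier_py (all_requires : List String) (out : Int) : Prop := out = compute_tier_py_alt all_requires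
instance (all_requires : List String) (out : Int) : Decidable (Spec_compute_tier_py all_requires out) := by unfold Spec_compute_tier_py; infer_instance

-- ===== CLAIM (what is proved, stated in full; the proofs are below) =====
def Claim_equal_compute_tier_py : Prop := ∀ (all_requires : List String), Dom_compute_tier_py all_requires → Spec_compute_tier_py all_requires (compute_tier_py all_requires)

-- ===== LEMMAS AND PROOFS =====

-- if the first scan hits (a tier-2 token exists), it returns 2 and B also returns 2, from any accumulator
theorem pvLoopB_of_loop1_some (xs : List String) (saw : Bool) (h : pvLoop1 xs ≠ none) :
    pvLoop1 xs = some 2 ∧ pvLoopB xs saw = 2 := by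
  induction xs generalizing saw with
  | nil => simp [pvLoop1] at h
  | cons t rest ih =>
      by_cases he : (pvPartition t.toList).1 = ['e', 'n', 'v']
      · by_cases h2 : pvAnyIn pvTier2Pats (pvPartition t.toList).2
        · constructor <;> simp [pvLoop1, pvLoopB, he, h2]
        · have h' : pvLoop1 rest ≠ none := by simpa [pvLoop1, he, h2] using h
          have hB : ∀ s, pvLoopB rest s = 2 := fun s => (ih s h').2
          refine ⟨?_, ?_⟩
          · simpa [pvLoop1, he, h2] using (ih saw h').1
          · simp [pvLoopB, he, h2, hB]
      · by_cases hc : (pvPartition t.toList).1 = ['c', 'o', 'o', 'k', 'i', 'e']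
        · constructor <;> simp [pvLoop1, pvLoopB, he, hc]
        · have h' : pvLoop1 rest ≠ none := by simpa [pvLoop1, he, hc] using h
          have hB : ∀ s, pvLoopB rest s = 2 := fun s => (ih s h').2
          refine ⟨?_, ?_⟩
          · simpa [pvLoop1, he, hc] using (ih saw h').1
          · simp [pvLoopB, he, hc, hB]

-- if the first scan misses, B equals "1 if saw-or-second-scan-hit else 0"
theorem pvLoopB_of_loop1_none (xs : List String) (saw : Bool) (h : pvLoop1 xs = none) :
    pvLoopB xs saw = (if saw then 1 else match pvLoop2 xs with | some r => r | none => 0) := by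
  induction xs generalizing saw with
  | nil => cases saw <;> simp [pvLoopB, pvLoop2]
  | cons t rest ih =>
      by_cases he : (pvPartition t.toList).1 = ['e', 'n', 'v']
      · by_cases h2 : pvAnyIn pvTier2Pats (pvPartition t.toList).2
        · simp [pvLoop1, he, h2] at h
        · have h' : pvLoop1 rest = none := by simpa [pvLoop1, he, h2] using h
          by_cases h1 : pvAnyIn pvTier1Pats (pvPartition t.toList).2
          · have := ih true h'
            simp only [if_true] at this
            cases saw <;> simp [pvLoopB, pvLoop2, he, h2, h1, this]
          · have := ih saw h'
            cases saw <;> simp_all [pvLoopB, pvLoop2, he, h2, h1]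
      · by_cases hc : (pvPartition t.toList).1 = ['c', 'o', 'o', 'k', 'i', 'e']
        · simp [pvLoop1, he, hc] at h
        · have h' : pvLoop1 rest = none := by simpa [pvLoop1, he, hc] using h
          by_cases hb : (pvPartition t.toList).1 = ['b', 'i', 'n', 'a', 'r', 'y'] ∨
              (pvPartition t.toList).1 = ['m', 'c', 'p']
          · have := ih true h'
            simp only [if_true] at this
            rcases hb with hb | hb <;> cases saw <;>
              simp [pvLoopB, pvLoop2, he, hc, hb, this]
          · have := ih saw h'
            push_neg at hb
            cases saw <;> simp_all [pvLoopB, pvLoop2, he, hc]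

-- ===== VERDICT (by name: the statement is the Claim_ definition above) =====
theorem compute_tier_py_spec : Claim_equal_compute_tier_py := by
  intro xs _
  unfold Spec_compute_tier_py compute_tier_py compute_tier_py_alt
  by_cases h : pvLoop1 xs = none
  · rw [pvLoopB_of_loop1_none xs false h, h]
    simp
  · have := pvLoopB_of_loop1_some xs false h
    rw [this.1, this.2]
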